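-- pv_equiv track=rewrite | github.com/amaterasuzxc/dbmodelgen | model/v1/parsing/format_ds.py | format_ds
-- ===== SOURCE A (Python) =====
-- from operator import itemgetter
-- from itertools import groupby
--
-- def format_ds(dataset):
--     for row in dataset[1:17]:
--         rowlist = row[2].split(',')
--         newrowlist = []
--         for entry in rowlist:
--             entry = entry.strip()
--             newrowlist.append([entry, entry.split(':')[0]])
--         newrowlist.sort(key=itemgetter(1))
--         grpd = [[x for x, y in g] for k, g in groupby(newrowlist, key=itemgetter(1))]
--         finalrowlist = []
--         for entryset in grpd:
--             finentry = entryset[0].split(':')[0] + ':['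
--             for entry in entryset:
--                 eset = entry.split(':')
--                 finentry += eset[1] + ':' + eset[2] + ','
--             finentry = finentry.rstrip(',')
--             finentry += ']'
--             finentry = finentry.replace('_', ' ')
--             finalrowlist.append(finentry)
--         row[2] = '"' + ';'.join(finalrowlist) + '"'
--     for row in dataset[17:]:
--         rowlist = row[2].split(';')
--         i = 0
--         for e in rowlist:
--             e = e.strip()
--             rowlist[i] = e
--             i += 1
--         row[2] = '"' + ';'.join(rowlist) + '"'
--     return dataset
-- ===== SOURCE B (Python) =====
-- def format_ds(dataset):
--     def fix_group_row(row):
--         entries = [e.strip() for e in row[2].split(',')]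
--         parts = []
--         for key in sorted({e.split(':')[0] for e in entries}):
--             pieces = [e.split(':')[1] + ':' + e.split(':')[2]
--                       for e in entries if e.split(':')[0] == key]
--             parts.append((key + ':[' + ','.join(pieces) + ']').replace('_', ' '))
--         return row[:2] + ['"' + ';'.join(parts) + '"'] + row[3:]
--
--     def fix_plain_row(row):
--         return row[:2] + ['"' + ';'.join(e.strip() for e in row[2].split(';')) + '"'] + row[3:]
--
--     return dataset[:1] + [fix_group_row(r) for r in dataset[1:17]] \
--                        + [fix_plain_row(r) for r in dataset[17:]]
-- ===== Notes on version B (the rewrite author's own statement) =====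
-- stated objective: alternative
-- what changed: A decorates entries with their key, stable-sorts the pairs, runs itertools.groupby and accumulates each group string with trailing commas plus rstrip; B never sorts or groups the entries at all: it collects the distinct keys in a set, and for each key in sorted order filters the stripped entry list and ','.joins the formatted pieces, rebuilding each row by slicing instead of in-place assignment (same return value; B does not mutate the argument, A does).
import Mathlib
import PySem

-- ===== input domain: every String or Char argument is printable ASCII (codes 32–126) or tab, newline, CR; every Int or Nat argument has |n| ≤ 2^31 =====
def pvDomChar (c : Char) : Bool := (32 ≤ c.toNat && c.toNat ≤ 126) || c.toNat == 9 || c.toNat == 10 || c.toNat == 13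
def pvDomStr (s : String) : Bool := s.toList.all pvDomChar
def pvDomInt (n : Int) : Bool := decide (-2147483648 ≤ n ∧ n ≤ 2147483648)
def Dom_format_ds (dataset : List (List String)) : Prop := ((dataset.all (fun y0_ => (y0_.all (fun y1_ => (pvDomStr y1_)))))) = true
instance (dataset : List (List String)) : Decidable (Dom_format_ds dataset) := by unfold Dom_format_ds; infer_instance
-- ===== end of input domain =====

-- B never sorts or groups the entry list: it takes the sorted set of keys and filters the entries
-- per key, ','.joining the pieces (no rstrip), and rebuilds each row by slicing; same return value.
-- A mutates its argument's rows in place, B does not: the equivalence is about the RETURN value.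

-- shared helpers (both Pythons compute these same subexpressions)
-- s.split(sep): exact here, every call site passes a nonempty literal separator, so split? is some
def pySplit (s sep : String) : List String := (PySem.Str.split? s sep).getD []
-- e.split(':')[0]: exact, split? with a nonempty sep always yields a nonempty list, so [0] never raises
def keyOf (e : String) : String := PySem.List.pyGetD (pySplit e ":") (0 : Int) ""

-- ===== PORT A =====
-- eset[1] + ':' + eset[2] + ','  (this indexing raises when eset is too short: excluded by Pre_)
def pieceOf (e : String) : String :=
  PySem.List.pyGetD (pySplit e ":") (1 : Int) "" ++ ":"
    ++ PySem.List.pyGetD (pySplit e ":") (2 : Int) "" ++ ","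
-- s.rstrip(','): hand port (PySem has no one-sided strip-with-chars); exact: drops the trailing run of ','
def rstripComma (s : String) : String :=
  String.ofList ((s.toList.reverse.dropWhile (fun c => c == ',')).reverse)

-- itertools.groupby keyed on the second component, each group with its members
def groupBySnd : List (String × String) → List (List (String × String))
  | [] => []
  | p :: rest =>
      (p :: rest.takeWhile (fun q => q.2 == p.2)) :: groupBySnd (rest.dropWhile (fun q => q.2 == p.2))
termination_by l => l.length
decreasing_by
  simp only [List.length_cons]
  exact Nat.lt_succ_of_le (List.length_dropWhile_le _ _)

-- A's inner formatting loop: finentry starts as entryset[0].split(':')[0] + ':[', each entry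
-- appends eset[1] + ':' + eset[2] + ',', then rstrip(','), + ']', replace('_', ' ')
def fmtGroupA (entryset : List String) : String :=
  PySem.Str.replace
    (rstripComma (entryset.foldl (fun acc entry => acc ++ pieceOf entry)
      (keyOf (PySem.List.pyGetD entryset (0 : Int) "") ++ ":[")) ++ "]") "_" " "

-- one row of dataset[1:17]: split row[2] on ',', build [entry, key] pairs, stable-sort by key,
-- groupby, format each group, join with ';' and store back into index 2
def rowBlock1A (row : List String) : List String :=
  row.set 2 ("\"" ++ PySem.Str.join ";"
    (List.foldl (fun acc entryset => acc ++ [fmtGroupA entryset]) []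
      (List.foldl (fun acc g => acc ++ [List.map (fun p => p.1) g]) []
        (groupBySnd (PySem.List.sorted
          (List.foldl (fun acc entry =>
            acc ++ [(PySem.Str.strip entry, keyOf (PySem.Str.strip entry))]) []
            (pySplit (PySem.List.pyGetD row (2 : Int) "") ","))
          (fun p => p.2) false)))) ++ "\"")

-- one row of dataset[17:]: i = 0; for e in rowlist: rowlist[i] = e.strip(); i += 1
def rowBlock2A (row : List String) : List String :=
  row.set 2 ("\"" ++ PySem.Str.join ";"
    ((List.foldl (fun (st : Nat × List String) e => (st.1 + 1, st.2.set st.1 (PySem.Str.strip e)))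
      (0, pySplit (PySem.List.pyGetD row (2 : Int) "") ";")
      (pySplit (PySem.List.pyGetD row (2 : Int) "") ";")).2) ++ "\"")

def format_ds (dataset : List (List String)) : List (List String) :=
  PySem.List.slice dataset none (some 1)
    ++ (PySem.List.slice dataset (some 1) (some 17)).map rowBlock1A
    ++ (PySem.List.slice dataset (some 17) none).map rowBlock2A

-- ===== PORT B =====
-- e.split(':')[1] + ':' + e.split(':')[2]  (no trailing comma: B joins with ',')
def pieceB (e : String) : String :=
  PySem.List.pyGetD (pySplit e ":") (1 : Int) "" ++ ":"
    ++ PySem.List.pyGetD (pySplit e ":") (2 : Int) ""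

-- (key + ':[' + ','.join(pieces) + ']').replace('_', ' ')
def fmtGroupB (c : String) (group : List String) : String :=
  PySem.Str.replace (c ++ ":[" ++ PySem.Str.join "," (group.map pieceB) ++ "]") "_" " "

-- entries = [e.strip() for e in row[2].split(',')]
def entriesOf (row : List String) : List String :=
  (pySplit (PySem.List.pyGetD row (2 : Int) "") ",").map PySem.Str.strip

-- for key in sorted({e.split(':')[0] for e in entries}): … [e for e in entries if e.split(':')[0] == key]
-- row[:2] + [new cell] + row[3:]
def rowBlock1B (row : List String) : List String :=
  PySem.List.slice row none (some 2)
    ++ ["\"" ++ PySem.Str.join ";"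
          ((PySem.List.sorted (PySem.Set.ofList ((entriesOf row).map keyOf)) (fun c => c) false).map
            (fun c => fmtGroupB c ((entriesOf row).filter (fun e => keyOf e == c)))) ++ "\""]
    ++ PySem.List.slice row (some 3) none

def rowBlock2B (row : List String) : List String :=
  PySem.List.slice row none (some 2)
    ++ ["\"" ++ PySem.Str.join ";"
          ((pySplit (PySem.List.pyGetD row (2 : Int) "") ";").map PySem.Str.strip) ++ "\""]
    ++ PySem.List.slice row (some 3) none

def format_ds_alt (dataset : List (List String)) : List (List String) :=
  PySem.List.slice dataset none (some 1)
    ++ (PySem.List.slice dataset (some 1) (some 17)).map rowBlock1B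
    ++ (PySem.List.slice dataset (some 17) none).map rowBlock2B

-- ===== PRECONDITION & SPEC =====
-- Pre_ = exactly the inputs on which Python A returns: A raises IndexError when a processed row
-- has fewer than 3 cells (reading row[2]), or when a stripped comma-entry of a row of
-- dataset[1:17] has fewer than three ':'-separated parts (reading eset[1] / eset[2]).
def Pre_format_ds (dataset : List (List String)) : Prop :=
  (∀ row ∈ PySem.List.slice dataset (some 1) (some 17),
      3 ≤ row.length ∧
      ∀ entry ∈ pySplit (PySem.List.pyGetD row (2 : Int) "") ",",
        3 ≤ (pySplit (PySem.Str.strip entry) ":").length) ∧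
  (∀ row ∈ PySem.List.slice dataset (some 17) none, 3 ≤ row.length)
instance (dataset : List (List String)) : Decidable (Pre_format_ds dataset) := by
  unfold Pre_format_ds; infer_instance

def pvWitness_format_ds : List (List String) :=
  [["id", "name", "cols"], ["1", "t", "a:f:v, b_x:g:w ,a:h:u"]]

def Spec_format_ds (dataset : List (List String)) (out : List (List String)) : Prop :=
  out = format_ds_alt dataset
instance (dataset : List (List String)) (out : List (List String)) :
    Decidable (Spec_format_ds dataset out) := by unfold Spec_format_ds; infer_instance

-- ===== CLAIM (what is proved, stated in full; the proofs are below) =====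
def Claim_equal_format_ds : Prop :=
  ∀ (dataset : List (List String)), Dom_format_ds dataset → Pre_format_ds dataset →
    Spec_format_ds dataset (format_ds dataset)

-- ===== LEMMAS AND PROOFS =====

-- ordered insertion of a key into a strictly sorted key list
def insKey (v : String) : List String → List String
  | [] => [v]
  | c :: K => if v < c then v :: c :: K else if v = c then c :: K else c :: insKey v K

lemma mem_insKey (v y : String) (K : List String) : y ∈ insKey v K ↔ y = v ∨ y ∈ K := by
  induction K with
  | nil => simp [insKey]
  | cons c K ih =>
      simp only [insKey]
      split_ifs with h1 h2
      · simp
      · subst h2; simp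
      · simp [ih]; tauto

lemma insKey_of_mem (v : String) (K : List String) (hs : K.Pairwise (· < ·)) (hv : v ∈ K) :
    insKey v K = K := by
  induction K with
  | nil => cases hv
  | cons c K ih =>
      rcases List.pairwise_cons.1 hs with ⟨hc, hK⟩
      rcases List.mem_cons.1 hv with h | h
      · subst h; simp [insKey]
      · have hcv : c < v := hc _ h
        have h1 : ¬ v < c := not_lt_of_gt hcv
        have h2 : ¬ v = c := by rintro rfl; exact lt_irrefl _ hcv
        simp [insKey, h1, h2, ih hK h]

lemma insKey_perm_of_not_mem (v : String) (K : List String) (hv : v ∉ K) :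
    (insKey v K).Perm (K ++ [v]) := by
  induction K with
  | nil => simp [insKey]
  | cons c K ih =>
      have hvc : v ≠ c := by rintro rfl; exact hv (List.mem_cons_self)
      have hvK : v ∉ K := fun h => hv (List.mem_cons_of_mem _ h)
      simp only [insKey, hvc, if_false]
      split_ifs with h1
      · rw [List.cons_append]
        exact (List.perm_append_comm (l₁ := c :: K) (l₂ := [v])).symm
      · exact (ih hvK).cons c

lemma insKey_pairwise (v : String) (K : List String) (hs : K.Pairwise (· < ·)) :
    (insKey v K).Pairwise (· < ·) := by
  induction K with
  | nil => simp [insKey]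
  | cons c K ih =>
      rcases List.pairwise_cons.1 hs with ⟨hc, hK⟩
      simp only [insKey]
      split_ifs with h1 h2
      · exact List.pairwise_cons.2 ⟨by
          intro y hy
          rcases List.mem_cons.1 hy with rfl | h
          · exact h1
          · exact lt_trans h1 (hc _ h), hs⟩
      · exact hs
      · have hcv : c < v := by
          rcases lt_trichotomy v c with h | h | h
          · exact absurd h h1
          · exact absurd h h2
          · exact h
        refine List.pairwise_cons.2 ⟨?_, ih hK⟩
        intro y hy
        rcases (mem_insKey v y K).1 hy with rfl | h
        · exact hcv
        · exact hc _ h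

lemma sorted_set_add (xs : List String) (v : String) :
    PySem.List.sorted (PySem.Set.add (PySem.Set.ofList xs) v) (fun c => c) false
      = insKey v (PySem.List.sorted (PySem.Set.ofList xs) (fun c => c) false) := by
  have hpw := PySem.List.sorted_ofList_pairwise_lt (xs := xs)
  by_cases hv : v ∈ PySem.Set.ofList xs
  · have hadd : PySem.Set.add (PySem.Set.ofList xs) v = PySem.Set.ofList xs := by
      simp [PySem.Set.add, PySem.Set.contains, hv]
    rw [hadd, insKey_of_mem v _ hpw ((PySem.List.mem_sorted _ _ _ _).2 hv)]
  · have hadd : PySem.Set.add (PySem.Set.ofList xs) v = PySem.Set.ofList xs ++ [v] := by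
      simp [PySem.Set.add, PySem.Set.contains, hv]
    rw [hadd]
    apply PySem.List.sorted_eq_of_perm_of_pairwise_lt
    · exact (insKey_perm_of_not_mem v _ (fun h => hv ((PySem.List.mem_sorted _ _ _ _).1 h))).trans
        (((PySem.List.sorted_perm (PySem.Set.ofList xs) (fun c => c) false)).append_right [v])
    · exact insKey_pairwise v _ hpw

-- insertBy walks past a block it does not go before
lemma insertBy_skip (before : (String × String) → (String × String) → Bool)
    (x : String × String) (ys zs : List (String × String))
    (h : ∀ y ∈ ys, before x y = false) :
    PySem.List.insertBy before x (ys ++ zs) = ys ++ PySem.List.insertBy before x zs := by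
  induction ys with
  | nil => simp
  | cons y ys ih =>
      have hy : before x y = false := h y List.mem_cons_self
      simp only [List.cons_append, PySem.List.insertBy, hy]
      simp [ih (fun y hy => h y (List.mem_cons_of_mem _ hy))]

lemma insertBy_front (before : (String × String) → (String × String) → Bool)
    (x : String × String) (zs : List (String × String))
    (h : ∀ y ∈ zs, before x y = true) :
    PySem.List.insertBy before x zs = x :: zs := by
  cases zs with
  | nil => rfl
  | cons y ys => simp [PySem.List.insertBy, h y List.mem_cons_self]

lemma insertBy_flatMap (x : String × String) (K : List String)
    (g : String → List (String × String))
    (hk : ∀ c ∈ K, ∀ p ∈ g c, p.2 = c) (hne : ∀ c ∈ K, g c ≠ [])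
    (hs : K.Pairwise (· < ·)) (hx : x.2 ∉ K → g x.2 = []) :
    PySem.List.insertBy (fun a b => decide (a.2 < b.2)) x (K.flatMap g)
      = (insKey x.2 K).flatMap (fun c => if c = x.2 then g c ++ [x] else g c) := by
  induction K with
  | nil =>
      simp only [List.flatMap_nil, insKey]
      simp [PySem.List.insertBy, hx (by simp)]
  | cons c K ih =>
      rcases List.pairwise_cons.1 hs with ⟨hc, hK⟩
      have hkc : ∀ p ∈ g c, p.2 = c := hk c List.mem_cons_self
      have hkK : ∀ c' ∈ K, ∀ p ∈ g c', p.2 = c' := fun c' h => hk c' (List.mem_cons_of_mem _ h)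
      have hneK : ∀ c' ∈ K, g c' ≠ [] := fun c' h => hne c' (List.mem_cons_of_mem _ h)
      rw [List.flatMap_cons]
      rcases lt_trichotomy x.2 c with h1 | h1 | h1
      · -- new smallest key: x goes in front of everything
        have hxK : x.2 ∉ c :: K := by
          intro h
          rcases List.mem_cons.1 h with rfl | h
          · exact lt_irrefl _ h1
          · exact lt_irrefl _ (h1.trans (hc _ h))
        have hfront : ∀ y ∈ g c ++ K.flatMap g,
            (fun a b : String × String => decide (a.2 < b.2)) x y = true := by
          intro y hy
          rcases List.mem_append.1 hy with hy | hy
          · simp [hkc y hy, h1]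
          · rcases List.mem_flatMap.1 hy with ⟨c', hc', hy'⟩
            simp [hkK c' hc' y hy', h1.trans (hc _ hc')]
        rw [insertBy_front _ _ _ hfront]
        have hik : insKey x.2 (c :: K) = x.2 :: c :: K := by
          simp [insKey, h1]
        rw [hik, List.flatMap_cons]
        have hself : (if x.2 = x.2 then g x.2 ++ [x] else g x.2) = [x] := by simp [hx hxK]
        rw [hself]
        have hrest : ((c :: K).flatMap (fun c' => if c' = x.2 then g c' ++ [x] else g c'))
            = (c :: K).flatMap g := by
          apply List.flatMap_congr
          intro c' hc'
          have : c' ≠ x.2 := fun h => hxK (h ▸ hc')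
          simp [this]
        rw [hrest]
        simp
      · -- existing key: x is appended at the end of its group
        have hskip : ∀ y ∈ g c,
            (fun a b : String × String => decide (a.2 < b.2)) x y = false := by
          intro y hy; simp [hkc y hy, h1]
        rw [insertBy_skip _ _ _ _ hskip]
        have hfront : ∀ y ∈ K.flatMap g,
            (fun a b : String × String => decide (a.2 < b.2)) x y = true := by
          intro y hy
          rcases List.mem_flatMap.1 hy with ⟨c', hc', hy'⟩
          simp [hkK c' hc' y hy', h1 ▸ hc _ hc']
        rw [insertBy_front _ _ _ hfront]
        have hik : insKey x.2 (c :: K) = c :: K := by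
          simp [insKey, h1]
        rw [hik, List.flatMap_cons]
        have hself : (if c = x.2 then g c ++ [x] else g c) = g c ++ [x] := by simp [h1]
        rw [hself]
        have hrest : K.flatMap (fun c' => if c' = x.2 then g c' ++ [x] else g c')
            = K.flatMap g := by
          apply List.flatMap_congr
          intro c' hc'
          have : c' ≠ x.2 := by
            intro h; subst h; exact lt_irrefl _ (h1 ▸ hc _ hc')
          simp [this]
        rw [hrest]
        simp
      · -- bigger key: skip group c and recurse
        have hskip : ∀ y ∈ g c,
            (fun a b : String × String => decide (a.2 < b.2)) x y = false := by
          intro y hy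
          simp only [decide_eq_false_iff_not, hkc y hy]
          exact not_lt_of_gt h1
        rw [insertBy_skip _ _ _ _ hskip]
        have hxK' : x.2 ∉ K → g x.2 = [] := by
          intro h
          apply hx
          intro hmem
          rcases List.mem_cons.1 hmem with he | hm
          · exact lt_irrefl _ (he ▸ h1)
          · exact h hm
        rw [ih hkK hneK hK hxK']
        have hik : insKey x.2 (c :: K) = c :: insKey x.2 K := by
          have h2 : ¬ x.2 < c := not_lt_of_gt h1
          have h3 : x.2 ≠ c := fun h => lt_irrefl _ (h ▸ h1)
          simp [insKey, h2, h3]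
        rw [hik, List.flatMap_cons]
        have : (if c = x.2 then g c ++ [x] else g c) = g c := by
          have : c ≠ x.2 := fun h => lt_irrefl _ (h ▸ h1)
          simp [this]
        rw [this]

-- a stable sort by the second component is the sorted distinct keys with their fibres
lemma stable_sorted_flatMap (l : List (String × String)) :
    PySem.List.sorted l (fun p => p.2) false
      = (PySem.List.sorted (PySem.Set.ofList (l.map (fun p => p.2))) (fun c => c) false).flatMap
          (fun c => l.filter (fun p => p.2 == c)) := by
  induction l using List.reverseRecOn with
  | nil => rfl
  | append_singleton l x ih =>
      have hK := PySem.List.sorted_ofList_pairwise_lt (xs := l.map (fun p => p.2))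
      have hmemK : ∀ c,
          c ∈ PySem.List.sorted (PySem.Set.ofList (l.map (fun p => p.2))) (fun c => c) false
          ↔ ∃ p ∈ l, p.2 = c := by
        intro c
        rw [PySem.List.mem_sorted, PySem.Set.mem_ofList]
        simp
      rw [PySem.List.sorted_eq_foldl_insertBy, List.foldl_append, List.foldl_cons, List.foldl_nil,
        ← PySem.List.sorted_eq_foldl_insertBy, ih]
      rw [insertBy_flatMap x _ _
        (by intro c hc p hp; simpa using (List.mem_filter.1 hp).2)
        (by intro c hc
            rcases (hmemK c).1 hc with ⟨p, hp, he⟩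
            exact List.ne_nil_of_mem (List.mem_filter.2 ⟨hp, by simp [he]⟩))
        hK
        (by intro hc
            rw [List.filter_eq_nil_iff]
            intro p hp
            simp only [beq_iff_eq]
            intro he
            exact hc ((hmemK x.2).2 ⟨p, hp, he⟩))]
      have hset : PySem.Set.ofList ((l ++ [x]).map (fun p => p.2))
          = PySem.Set.add (PySem.Set.ofList (l.map (fun p => p.2))) x.2 := by
        simp [PySem.Set.ofList_eq_foldl, List.foldl_append]
      rw [hset, sorted_set_add]
      apply List.flatMap_congr
      intro c hc
      rw [List.filter_append]
      by_cases hcx : c = x.2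
      · subst hcx
        simp
      · simp [hcx, Ne.symm hcx, beq_iff_eq]

lemma takeWhile_all_append (p : String × String → Bool) (t r : List (String × String))
    (h1 : ∀ y ∈ t, p y = true) (h2 : ∀ y ∈ r, p y = false) :
    (t ++ r).takeWhile p = t ∧ (t ++ r).dropWhile p = r := by
  induction t with
  | nil =>
      cases r with
      | nil => simp
      | cons a r => simp [h2 a List.mem_cons_self]
  | cons a t ih =>
      have ha : p a = true := h1 a List.mem_cons_self
      have := ih (fun y hy => h1 y (List.mem_cons_of_mem _ hy))
      simp [ha, this.1, this.2]

lemma groupBySnd_flatMap (K : List String) (g : String → List (String × String))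
    (hk : ∀ c ∈ K, ∀ p ∈ g c, p.2 = c) (hne : ∀ c ∈ K, g c ≠ [])
    (hs : K.Pairwise (· < ·)) :
    groupBySnd (K.flatMap g) = K.map g := by
  induction K with
  | nil => simp [groupBySnd]
  | cons c K ih =>
      rcases List.pairwise_cons.1 hs with ⟨hc, hK⟩
      obtain ⟨q, t, hgc⟩ : ∃ q t, g c = q :: t := by
        have := hne c List.mem_cons_self
        rcases hgc : g c with _ | ⟨q, t⟩
        · exact absurd hgc this
        · exact ⟨q, t, rfl⟩
      have hq2 : q.2 = c := hk c List.mem_cons_self q (by rw [hgc]; exact List.mem_cons_self)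
      have ht : ∀ y ∈ t, (fun y : String × String => y.2 == q.2) y = true := by
        intro y hy
        simp [hk c List.mem_cons_self y (by rw [hgc]; exact List.mem_cons_of_mem _ hy), hq2]
      have hr : ∀ y ∈ K.flatMap g, (fun y : String × String => y.2 == q.2) y = false := by
        intro y hy
        rcases List.mem_flatMap.1 hy with ⟨c', hc', hy'⟩
        have : y.2 = c' := hk c' (List.mem_cons_of_mem _ hc') y hy'
        simp [this, hq2]
        exact fun h => absurd (h ▸ hc _ hc') (lt_irrefl _)
      have hsplit := takeWhile_all_append (fun y => y.2 == q.2) t (K.flatMap g) ht hr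
      rw [List.flatMap_cons, hgc, List.cons_append, groupBySnd]
      rw [hsplit.1, hsplit.2, ih (fun c' h => hk c' (List.mem_cons_of_mem _ h))
        (fun c' h => hne c' (List.mem_cons_of_mem _ h)) hK]
      rw [List.map_cons, hgc]

-- string-building loop = concatenation of the mapped pieces
lemma chars_join_empty (l : List (List Char)) : PySem.Chars.join [] l = l.flatten := by
  show List.intercalate [] l = _
  induction l with
  | nil => rfl
  | cons a t ih => cases t <;> simp_all [List.intercalate]

lemma foldl_str_append (f : String → String) (xs : List String) : ∀ a : String,
    xs.foldl (fun acc e => acc ++ f e) a = a ++ PySem.Str.join "" (xs.map f) := by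
  induction xs with
  | nil =>
      intro a
      apply String.ext
      simp [String.toList_append]
  | cons x t ih =>
      intro a
      rw [List.foldl_cons, ih]
      apply String.ext
      simp [String.toList_append, chars_join_empty]

-- ---- split-parts facts (by induction over PySem.Chars.splitOn.go, whose equations are rfl) ----

lemma splitOn_go_zero (sep l cur : List Char) (acc : List (List Char)) :
    PySem.Chars.splitOn.go sep 0 l cur acc = ((cur.reverse ++ l) :: acc).reverse := rfl

lemma splitOn_go_nil (sep : List Char) (fuel : Nat) (cur : List Char) (acc : List (List Char)) :
    PySem.Chars.splitOn.go sep (fuel+1) [] cur acc = (cur.reverse :: acc).reverse := rfl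

lemma splitOn_go_cons (sep : List Char) (fuel : Nat) (c : Char) (rest cur : List Char)
    (acc : List (List Char)) :
    PySem.Chars.splitOn.go sep (fuel+1) (c :: rest) cur acc =
      if sep.isPrefixOf (c :: rest) then
        PySem.Chars.splitOn.go sep fuel (List.drop sep.length (c :: rest)) [] (cur.reverse :: acc)
      else PySem.Chars.splitOn.go sep fuel rest (c :: cur) acc := rfl

-- every character of every part comes from the input (or the accumulators)
lemma splitOn_go_subset (P : Char → Prop) (sep : List Char) (fuel : Nat) :
    ∀ (l cur : List Char) (acc : List (List Char)),
      (∀ c ∈ l, P c) → (∀ c ∈ cur, P c) → (∀ p ∈ acc, ∀ c ∈ p, P c) →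
      ∀ p ∈ PySem.Chars.splitOn.go sep fuel l cur acc, ∀ c ∈ p, P c := by
  induction fuel with
  | zero =>
      intro l cur acc hl hcur hacc p hp c hc
      rw [splitOn_go_zero, List.mem_reverse] at hp
      rcases List.mem_cons.1 hp with rfl | hp
      · rcases List.mem_append.1 hc with h | h
        · exact hcur c (List.mem_reverse.1 h)
        · exact hl c h
      · exact hacc p hp c hc
  | succ fuel ih =>
      intro l cur acc hl hcur hacc p hp c hc
      cases l with
      | nil =>
          rw [splitOn_go_nil, List.mem_reverse] at hp
          rcases List.mem_cons.1 hp with rfl | hp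
          · exact hcur c (List.mem_reverse.1 hc)
          · exact hacc p hp c hc
      | cons a rest =>
          rw [splitOn_go_cons] at hp
          split_ifs at hp with hpre
          · refine ih _ _ _ ?_ (by simp) ?_ p hp c hc
            · intro x hx
              exact hl x (List.mem_of_mem_drop hx)
            · intro q hq x hx
              rcases List.mem_cons.1 hq with rfl | hq
              · exact hcur x (List.mem_reverse.1 hx)
              · exact hacc q hq x hx
          · refine ih _ _ _ ?_ ?_ hacc p hp c hc
            · intro x hx; exact hl x (List.mem_cons_of_mem _ hx)
            · intro x hx
              rcases List.mem_cons.1 hx with rfl | hx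
              · exact hl x List.mem_cons_self
              · exact hcur x hx

-- splitting on ',' produces comma-free parts (fuel is large enough in splitOn itself)
lemma splitOn_go_comma_free (fuel : Nat) :
    ∀ (l cur : List Char) (acc : List (List Char)), l.length < fuel →
      ',' ∉ cur → (∀ p ∈ acc, ',' ∉ p) →
      ∀ p ∈ PySem.Chars.splitOn.go [','] fuel l cur acc, ',' ∉ p := by
  induction fuel with
  | zero => intro l cur acc h; omega
  | succ fuel ih =>
      intro l cur acc hfuel hcur hacc p hp
      cases l with
      | nil =>
          rw [splitOn_go_nil, List.mem_reverse] at hp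
          rcases List.mem_cons.1 hp with rfl | hp
          · intro h; exact hcur (List.mem_reverse.1 h)
          · exact hacc p hp
      | cons a rest =>
          rw [splitOn_go_cons] at hp
          by_cases ha : a = ','
          · have hpre : List.isPrefixOf [','] (a :: rest) = true := by
              simp [List.isPrefixOf, ha]
            rw [if_pos hpre] at hp
            have hdrop : List.drop (List.length [',']) (a :: rest) = rest := by simp
            rw [hdrop] at hp
            refine ih rest [] _ (by simp at hfuel ⊢; omega) (by simp) ?_ p hp
            intro q hq
            rcases List.mem_cons.1 hq with rfl | hq
            · intro h; exact hcur (List.mem_reverse.1 h)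
            · exact hacc q hq
          · have hpre : List.isPrefixOf [','] (a :: rest) = false := by
              simp [List.isPrefixOf]
              exact fun h => ha h.symm
            rw [if_neg (by simp [hpre])] at hp
            refine ih rest (a :: cur) acc (by simp at hfuel ⊢; omega) ?_ hacc p hp
            intro h
            rcases List.mem_cons.1 h with h | h
            · exact ha h.symm
            · exact hcur h

-- bridge: a member of pySplit s sep (sep a nonempty literal) is a part of Chars.splitOn
lemma toList_mem_pySplit (s sep : String) (hsep : sep.toList ≠ []) (e : String)
    (he : e ∈ pySplit s sep) :
    e.toList ∈ PySem.Chars.splitOn s.toList sep.toList := by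
  have hb := PySem.Str.split?_map s sep
  have hne : sep.toList.isEmpty = false := by
    cases h : sep.toList with
    | nil => exact absurd h hsep
    | cons a t => simp
  rw [PySem.Chars.split?, hne] at hb
  simp only [Bool.false_eq_true, if_false] at hb
  cases hsp : PySem.Str.split? s sep with
  | none => rw [hsp] at hb; simp at hb
  | some parts =>
      rw [hsp] at hb
      simp only [Option.map_some] at hb
      have : e.toList ∈ parts.map String.toList := List.mem_map.2 ⟨e, by
        simpa [pySplit, hsp] using he, rfl⟩
      rw [Option.some_inj.1 hb] at this
      exact this

lemma comma_not_mem_split (s e : String) (he : e ∈ pySplit s ",") : ',' ∉ e.toList := by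
  have h := toList_mem_pySplit s "," (by decide) e he
  have hlist : ("," : String).toList = [','] := by decide
  rw [hlist] at h
  exact splitOn_go_comma_free (s.toList.length + 1) s.toList [] []
    (by omega) (by simp) (by simp) e.toList h

lemma chars_of_split_colon (e p : String) (hp : p ∈ pySplit e ":") :
    ∀ c ∈ p.toList, c ∈ e.toList := by
  have h := toList_mem_pySplit e ":" (by decide) p hp
  exact splitOn_go_subset (fun c => c ∈ e.toList) _ _ _ _ _
    (fun c hc => hc) (by simp) (by simp) p.toList h

lemma chars_of_strip (s : String) : ∀ c ∈ (PySem.Str.strip s).toList, c ∈ s.toList := by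
  intro c hc
  rw [PySem.Str.toList_strip, PySem.Chars.strip, PySem.Chars.rstrip, PySem.Chars.lstrip] at hc
  rw [List.mem_reverse] at hc
  have h1 := (List.dropWhile_sublist (l := (List.dropWhile PySem.Chars.isspace s.toList).reverse)
    (p := PySem.Chars.isspace)).mem hc
  rw [List.mem_reverse] at h1
  exact (List.dropWhile_sublist (l := s.toList) (p := PySem.Chars.isspace)).mem h1

-- the comma-free eset[2] of a comma-free entry
lemma comma_free_part2 (e : String) (he : ',' ∉ e.toList) :
    ',' ∉ (PySem.List.pyGetD (pySplit e ":") (2 : Int) "").toList := by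
  rw [PySem.List.pyGetD_of_nonneg _ _ (by norm_num)]
  have h2 : ((2 : Int)).toNat = 2 := rfl
  rw [h2]
  by_cases h : 2 < (pySplit e ":").length
  · rw [List.getD_eq_getElem _ _ h]
    intro hc
    exact he (chars_of_split_colon e _ (List.getElem_mem h) ',' hc)
  · rw [List.getD_eq_default _ _ (by omega)]
    simp

-- ---- the two string-shape lemmas behind ','.join vs build-then-rstrip ----

lemma intercalate_comma_concat (ps : List (List Char)) (pk : List Char) :
    List.intercalate [','] (ps ++ [pk]) = (ps.map (· ++ [','])).flatten ++ pk := by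
  induction ps with
  | nil => simp [List.intercalate]
  | cons q ps ih =>
      have hcons : ∃ b l, ps ++ [pk] = b :: l := by
        cases hp : ps ++ [pk] with
        | nil => exact absurd hp (by simp)
        | cons b l => exact ⟨b, l, rfl⟩
      rcases hcons with ⟨b, l, hbl⟩
      have hstep : List.intercalate [','] (q :: b :: l)
          = q ++ [','] ++ List.intercalate [','] (b :: l) := by
        simp [List.intercalate, List.intersperse]
      rw [List.cons_append, hbl, hstep, ← hbl, ih]
      simp

lemma dropWhile_comma_generic (Z : List Char) (hZ : Z ≠ []) (hlast : Z.getLast hZ ≠ ',') :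
    ((Z ++ [',']).reverse.dropWhile (fun c => c == ',')).reverse = Z := by
  have hZsplit : Z = Z.dropLast ++ [Z.getLast hZ] := (List.dropLast_append_getLast hZ).symm
  have hrev : (Z ++ [',']).reverse = ',' :: (Z.getLast hZ :: Z.dropLast.reverse) := by
    conv_lhs => rw [hZsplit]
    simp
  rw [hrev, List.dropWhile_cons]
  simp only [beq_self_eq_true, if_true]
  rw [List.dropWhile_cons]
  have : (Z.getLast hZ == ',') = false := by simp [hlast]
  rw [this]
  simp only [Bool.false_eq_true, if_false]
  rw [List.reverse_cons, List.reverse_reverse]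
  exact hZsplit.symm

lemma getLast_piece_ne_comma (w1 w2 : List Char) (h : ',' ∉ w2) :
    ∀ (hne : w1 ++ ':' :: w2 ≠ []), (w1 ++ ':' :: w2).getLast hne ≠ ',' := by
  intro hne
  have h2 : (':' :: w2) ≠ [] := by simp
  rw [List.getLast_append_of_ne_nil hne h2]
  have hmem := List.getLast_mem h2
  rcases List.mem_cons.1 hmem with heq | hmem'
  · rw [heq]; decide
  · intro hc; rw [hc] at hmem'; exact h hmem'

lemma pieceB_toList (e : String) :
    (pieceB e).toList = (PySem.List.pyGetD (pySplit e ":") (1 : Int) "").toList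
      ++ ':' :: (PySem.List.pyGetD (pySplit e ":") (2 : Int) "").toList := by
  simp [pieceB, String.toList_append]

lemma pieceOf_eq (e : String) : pieceOf e = pieceB e ++ "," := by
  apply String.ext
  simp [pieceOf, pieceB, String.toList_append]

-- per-group: A's build-with-trailing-commas + rstrip equals B's ','.join
set_option maxHeartbeats 1600000 in
lemma fmtGroup_eq (c : String) (grp : List String) (hne : grp ≠ [])
    (hkey : keyOf (PySem.List.pyGetD grp (0 : Int) "") = c)
    (hcomma : ∀ e ∈ grp, ',' ∉ e.toList) :
    fmtGroupA grp = fmtGroupB c grp := by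
  obtain ⟨init, glast, rfl⟩ : ∃ init glast, grp = init ++ [glast] := by
    rcases List.eq_nil_or_concat grp with h | ⟨L, b, h⟩
    · exact absurd h hne
    · exact ⟨L, b, by simpa using h⟩
  unfold fmtGroupA fmtGroupB
  rw [foldl_str_append pieceOf _ _, hkey]
  have hlastcomma : ',' ∉ (PySem.List.pyGetD (pySplit glast ":") (2 : Int) "").toList :=
    comma_free_part2 glast (hcomma glast (by simp))
  set ps := List.map (String.toList ∘ pieceB) init with hps
  set pk := (pieceB glast).toList with hpk
  have hpkne : pk ≠ [] := by
    rw [hpk, pieceB_toList]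
    simp
  have hpklast : ∀ h : pk ≠ [], pk.getLast h ≠ ',' := by
    rw [hpk, pieceB_toList]
    exact getLast_piece_ne_comma _ _ hlastcomma
  have hchars_join : ∀ (sep : List Char) (l : List (List Char)),
      PySem.Chars.join sep l = List.intercalate sep l := fun _ _ => rfl
  set Z := ((c ++ ":[") ++ PySem.Str.join "," ((init ++ [glast]).map pieceB)).toList with hZdef
  have hmapB : List.map String.toList ((init ++ [glast]).map pieceB) = ps ++ [pk] := by
    simp [hps, hpk, List.map_map]
  have hjoinB : Z = ((c ++ ":[").toList ++ (ps.map (· ++ [','])).flatten) ++ pk := by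
    rw [hZdef, String.toList_append, PySem.Str.toList_join, hmapB, hchars_join]
    have hsep : ("," : String).toList = [','] := by decide
    rw [hsep, intercalate_comma_concat]
    simp
  have hZne : Z ≠ [] := by
    rw [hjoinB]
    exact List.append_ne_nil_of_right_ne_nil _ hpkne
  have hZlast : ∀ h : Z ≠ [], Z.getLast h ≠ ',' := by
    rw [hjoinB]
    intro h
    rw [List.getLast_append_of_ne_nil h hpkne]
    exact hpklast hpkne
  have hinner : rstripComma ((c ++ ":[") ++ PySem.Str.join "" ((init ++ [glast]).map pieceOf))
      = (c ++ ":[") ++ PySem.Str.join "," ((init ++ [glast]).map pieceB) := by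
    apply String.ext
    have hrc : ∀ s : String, (rstripComma s).toList
        = (s.toList.reverse.dropWhile (fun c => c == ',')).reverse := by
      intro s; simp [rstripComma]
    rw [hrc]
    have hpieces : List.map String.toList ((init ++ [glast]).map pieceOf)
        = ps.map (· ++ [',']) ++ [pk ++ [',']] := by
      simp only [List.map_map, List.map_append, List.map_cons, List.map_nil]
      congr 1
      · rw [hps, List.map_map]
        apply List.map_congr_left
        intro e _
        simp [Function.comp, pieceOf_eq, String.toList_append]
      · simp [hpk, pieceOf_eq, String.toList_append]
    have hXZ : ((c ++ ":[") ++ PySem.Str.join "" ((init ++ [glast]).map pieceOf)).toList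
        = Z ++ [','] := by
      rw [String.toList_append, PySem.Str.toList_join, hpieces]
      have hsep0 : ("" : String).toList = [] := rfl
      rw [hsep0, chars_join_empty, hjoinB]
      simp
    rw [hXZ]
    exact dropWhile_comma_generic Z hZne (hZlast hZne)
  rw [hinner]

-- block 2: the indexed in-place strip loop is List.map
lemma setfold_eq_map (f : String → String) (xs : List String) : ∀ zs : List String,
    (xs.foldl (fun (st : Nat × List String) e => (st.1 + 1, st.2.set st.1 (f e)))
      (zs.length, zs ++ xs)).2 = zs ++ xs.map f := by
  induction xs with
  | nil => intro zs; simp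
  | cons x t ih =>
      intro zs
      rw [List.foldl_cons]
      have h1 : (zs ++ x :: t).set zs.length (f x) = (zs ++ [f x]) ++ t := by
        rw [List.set_append_right _ _ (le_refl _)]
        simp
      have h2 : zs.length + 1 = (zs ++ [f x]).length := by simp
      rw [h1, h2, ih (zs ++ [f x])]
      simp

-- row.set 2 v  =  row[:2] ++ [v] ++ row[3:]  for rows with at least 3 cells
lemma set_two_eq_slices (row : List String) (v : String) (hlen : 3 ≤ row.length) :
    row.set 2 v = PySem.List.slice row none (some 2) ++ [v] ++ PySem.List.slice row (some 3) none := by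
  have h2 : PySem.List.slice row none (some 2) = row.take 2 := by
    have := PySem.List.slice_to (xs := row) (b := 2) (by norm_num)
    simpa using this
  have h3 : PySem.List.slice row (some 3) none = row.drop 3 := by
    have := PySem.List.slice_from (xs := row) (a := 3) (by norm_num)
    simpa using this
  rw [h2, h3, List.set_eq_take_cons_drop v (by omega)]
  simp

lemma rowBlock2_eq (row : List String) (hlen : 3 ≤ row.length) :
    rowBlock2A row = rowBlock2B row := by
  unfold rowBlock2A rowBlock2B
  have hmap := setfold_eq_map PySem.Str.strip (pySplit (PySem.List.pyGetD row (2 : Int) "") ";") []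
  simp only [List.nil_append, List.length_nil] at hmap
  rw [hmap, set_two_eq_slices row _ hlen]

lemma rowBlock1_eq (row : List String) (hlen : 3 ≤ row.length) :
    rowBlock1A row = rowBlock1B row := by
  unfold rowBlock1A rowBlock1B
  set rowlist := pySplit (PySem.List.pyGetD row (2 : Int) "") "," with hrowlist
  set es := rowlist.map PySem.Str.strip with hesdef
  -- A's pair-building loop is a map
  have hpairs : List.foldl (fun acc entry =>
      acc ++ [(PySem.Str.strip entry, keyOf (PySem.Str.strip entry))]) [] rowlist
      = es.map (fun e => (e, keyOf e)) := by
    rw [PySem.List.foldl_append_singleton_eq_map (fun entry =>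
      ((PySem.Str.strip entry, keyOf (PySem.Str.strip entry)) : String × String)) rowlist []]
    simp [hesdef, List.map_map, Function.comp]
  rw [hpairs]
  -- the sorted distinct keys
  have hkeys : (es.map (fun e => (e, keyOf e))).map (fun p : String × String => p.2)
      = es.map keyOf := by simp [List.map_map, Function.comp]
  set K := PySem.List.sorted (PySem.Set.ofList (es.map keyOf)) (fun c => c) false with hKdef
  have hKpw : K.Pairwise (· < ·) := PySem.List.sorted_ofList_pairwise_lt _
  have hKmem : ∀ c, c ∈ K ↔ ∃ e ∈ es, keyOf e = c := by
    intro c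
    rw [hKdef, PySem.List.mem_sorted, PySem.Set.mem_ofList]
    simp
  -- the fibres
  set g : String → List (String × String) :=
    fun c => (es.filter (fun e => keyOf e == c)).map (fun e => (e, keyOf e)) with hgdef
  have hfib : ∀ c, (es.map (fun e => (e, keyOf e))).filter (fun p => p.2 == c) = g c := by
    intro c
    rw [List.filter_map]
    rfl
  have hk : ∀ c ∈ K, ∀ p ∈ g c, p.2 = c := by
    intro c _ p hp
    rcases List.mem_map.1 hp with ⟨e, he, rfl⟩
    simpa using (List.mem_filter.1 he).2
  have hne : ∀ c ∈ K, g c ≠ [] := by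
    intro c hc
    rcases (hKmem c).1 hc with ⟨e, he, hke⟩
    exact List.ne_nil_of_mem (List.mem_map.2 ⟨e, List.mem_filter.2 ⟨he, by simp [hke]⟩, rfl⟩)
  -- A's sorted+groupby = fibres over sorted keys
  have hsorted : PySem.List.sorted (es.map (fun e => (e, keyOf e))) (fun p => p.2) false
      = K.flatMap g := by
    rw [stable_sorted_flatMap, hkeys, ← hKdef]
    exact List.flatMap_congr (fun c _ => hfib c)
  rw [hsorted, groupBySnd_flatMap K g hk hne hKpw]
  rw [PySem.List.foldl_append_singleton_eq_map
        (fun gq : List (String × String) => gq.map (fun p => p.1)) (K.map g) []]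
  rw [PySem.List.foldl_append_singleton_eq_map fmtGroupA _ []]
  simp only [List.nil_append, List.map_map]
  -- per-key group equality
  have hlists : K.map (fmtGroupA ∘ (fun gq : List (String × String) =>
        gq.map (fun p => p.1)) ∘ g)
      = K.map (fun c => fmtGroupB c (es.filter (fun e => keyOf e == c))) := by
    apply List.map_congr_left
    intro c hc
    rw [Function.comp_apply, Function.comp_apply]
    have hgrp : (g c).map (fun p : String × String => p.1)
        = es.filter (fun e => keyOf e == c) := by
      simp [hgdef, List.map_map, Function.comp_def]
    rw [hgrp]
    set grp := es.filter (fun e => keyOf e == c) with hgrpdef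
    have hgrpne : grp ≠ [] := by
      rcases (hKmem c).1 hc with ⟨e, he, hke⟩
      exact List.ne_nil_of_mem (List.mem_filter.2 ⟨he, by simp [hke]⟩)
    obtain ⟨h0, tl, hcons⟩ : ∃ h0 tl, grp = h0 :: tl := by
      rcases hgrpeq : grp with _ | ⟨h0, tl⟩
      · exact absurd hgrpeq hgrpne
      · exact ⟨h0, tl, rfl⟩
    have hhead : keyOf (PySem.List.pyGetD grp (0 : Int) "") = c := by
      rw [hcons]
      have hget0 : PySem.List.pyGetD (h0 :: tl) (0 : Int) "" = h0 := by
        simp [PySem.List.pyGetD, PySem.List.pyGet?, PySem.List.pyIdx?]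
      rw [hget0]
      have := (List.mem_filter.1 (hcons ▸ List.mem_cons_self (l := tl) (a := h0))).2
      simpa using this
    have hcommas : ∀ e ∈ grp, ',' ∉ e.toList := by
      intro e he
      have hees : e ∈ es := (List.mem_filter.1 he).1
      rcases List.mem_map.1 hees with ⟨entry, hentry, rfl⟩
      intro hc'
      exact comma_not_mem_split _ entry hentry (chars_of_strip entry ',' hc')
    exact fmtGroup_eq c grp hgrpne hhead hcommas
  rw [hlists, set_two_eq_slices row _ hlen]
  rfl

-- ===== VERDICT (by name: the statement is the Claim_ definition above) =====
theorem format_ds_spec : Claim_equal_format_ds := by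
  intro dataset _ hpre
  unfold Spec_format_ds format_ds format_ds_alt
  congr 1
  · congr 1
    apply List.map_congr_left
    intro row hrow
    exact rowBlock1_eq row (hpre.1 row hrow).1
  · apply List.map_congr_left
    intro row hrow
    exact rowBlock2_eq row (hpre.2 row hrow)
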